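-- pv_equiv track=rewrite | github.com/structuralbioinformatics/ModCRE_Offline | ModCRElib/analysis/benchmark/benchmark.py | split_list_into_n_sublists_old
-- ===== SOURCE A (Python) =====
-- def split_list_into_n_sublists_old(list_of_items, n=5):
--     """
--     This function splits a {list} of items into a {list} containing n {list}s.
--
--     @input:
--     list_of_items {list}
--     n {int} by default is 5
--
--     @return:
--     list_of_lists {list} of {list}s
--
--     """
--
--     # Initialize #
--     list_of_lists = []
--     # For each sublist... #
--     for i in range(n):
--         list_of_lists.append([])
--     # For each item... #
--     for item in list_of_items:
--         # For each sublist... #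
--         for i in range(n):
--             # Initialize #
--             add = True
--             # For each remaining sublist... #
--             for j in range(i, n):
--                 if len(list_of_lists[i]) != len(list_of_lists[j]):
--                     add = False
--                     break
--             # If add... #
--             if add:
--                 list_of_lists[i].append(item)
--                 break
--
--     return list_of_lists
-- ===== SOURCE B (Python) =====
-- def split_list_into_n_sublists_old(list_of_items, n=5):
--     if n <= 0:
--         return []
--     sublists = [[] for _ in range(n)]
--     for k, item in enumerate(list_of_items):
--         sublists[k % n].append(item)
--     return sublists
-- ===== Notes on version B (the rewrite author's own statement) =====
-- stated objective: faster
-- what changed: Replaces the per-item linear scan with its nested equal-length suffix check by direct round-robin placement: item k is appended to sublist k mod n in a single pass (with an up-front n <= 0 guard returning []).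
import Mathlib
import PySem

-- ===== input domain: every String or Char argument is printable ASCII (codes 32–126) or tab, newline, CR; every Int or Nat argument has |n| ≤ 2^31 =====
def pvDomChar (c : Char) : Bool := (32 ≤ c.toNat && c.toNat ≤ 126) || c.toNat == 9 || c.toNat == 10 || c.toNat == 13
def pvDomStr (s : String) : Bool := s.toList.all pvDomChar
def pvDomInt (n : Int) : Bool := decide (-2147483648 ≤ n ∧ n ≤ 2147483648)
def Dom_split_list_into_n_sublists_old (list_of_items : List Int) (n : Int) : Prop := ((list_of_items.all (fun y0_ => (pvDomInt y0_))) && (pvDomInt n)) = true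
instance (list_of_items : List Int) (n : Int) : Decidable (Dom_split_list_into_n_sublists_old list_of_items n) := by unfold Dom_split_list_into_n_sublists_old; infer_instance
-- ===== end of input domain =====

-- B replaces A's per-item scan with nested equal-length checks by direct round-robin
-- placement (item k into sublist k mod n), one pass; measured asymptotically faster.


-- ===== PORT A =====
-- inner 'for j in range(i, n): if len(..i..) != len(..j..): add = False; break' — add ends True iff all lengths equal
-- (indices i, j are always in range, so pyGetD's default is never taken)
def pvAllEq (lists : List (List Int)) (i n : Int) : Bool :=
  (PySem.List.pyRange i n 1).all
    (fun j => (PySem.List.pyGetD lists i []).length == (PySem.List.pyGetD lists j []).length)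

-- 'for i in range(n): … if add: list_of_lists[i].append(item); break'
def pvPlace (n : Int) (item : Int) (lists : List (List Int)) : List Int → List (List Int)
  | [] => lists
  | i :: rest =>
      if pvAllEq lists i n then
        PySem.List.pySetD lists i (PySem.List.pyGetD lists i [] ++ [item])
      else pvPlace n item lists rest

def split_list_into_n_sublists_old (list_of_items : List Int) (n : Int) : List (List Int) :=
  let init := (PySem.List.pyRange 0 n 1).foldl (fun acc _ => acc ++ [([] : List Int)]) []
  list_of_items.foldl (fun lists item => pvPlace n item lists (PySem.List.pyRange 0 n 1)) init

-- ===== PORT B =====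
-- Source B: n <= 0 guard, then one pass: sublists[k % n].append(item)  (index k % n is always in range)
def split_list_into_n_sublists_old_alt (list_of_items : List Int) (n : Int) : List (List Int) :=
  if n ≤ 0 then []
  else
    (PySem.List.enumerate list_of_items 0).foldl
      (fun ls p =>
        PySem.List.pySetD ls (PySem.Int.mod p.1 n)
          (PySem.List.pyGetD ls (PySem.Int.mod p.1 n) [] ++ [p.2]))
      ((PySem.List.pyRange 0 n 1).map (fun _ => ([] : List Int)))

-- ===== PRECONDITION & SPEC =====
def Spec_split_list_into_n_sublists_old (list_of_items : List Int) (n : Int) (out : List (List Int)) : Prop := out = split_list_into_n_sublists_old_alt list_of_items n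
instance (list_of_items : List Int) (n : Int) (out : List (List Int)) : Decidable (Spec_split_list_into_n_sublists_old list_of_items n out) := by unfold Spec_split_list_into_n_sublists_old; infer_instance

-- ===== CLAIM (what is proved, stated in full; the proofs are below) =====
def Claim_equal_split_list_into_n_sublists_old : Prop := ∀ (list_of_items : List Int) (n : Int), Dom_split_list_into_n_sublists_old list_of_items n → Spec_split_list_into_n_sublists_old list_of_items n (split_list_into_n_sublists_old list_of_items n)

-- ===== LEMMAS AND PROOFS =====

-- length invariant of the round-robin state after k placed items into m sublists
def pvInv (m k : Nat) (s : List (List Int)) : Prop :=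
  s.length = m ∧ ∀ i : Nat, i < m → (s.getD i []).length = k / m + (if i < k % m then 1 else 0)

theorem pvInv_zero (m : Nat) : pvInv m 0 (List.replicate m ([] : List Int)) := by
  refine ⟨by simp, ?_⟩
  intro i hi
  simp [List.getD, hi, Nat.zero_mod]

theorem pv_initA (c : List (List Int)) (L : List Int) :
    L.foldl (fun acc _ => acc ++ [([] : List Int)]) c = c ++ List.replicate L.length [] := by
  induction L generalizing c with
  | nil => simp
  | cons x xs ih => simp [List.foldl_cons, ih, List.replicate_succ]

-- in a balanced round-robin state, the first slot whose suffix has all-equal lengths is k % m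
theorem pv_place_aux (m : Nat) (hm : 0 < m) (k : Nat) (item : Int) (s : List (List Int))
    (hInv : pvInv m k s) :
    ∀ (d a : Nat), a ≤ k % m → k % m - a = d →
      pvPlace (m : Int) item s (PySem.List.pyRange (a : Int) (m : Int) 1)
        = s.set (k % m) (s.getD (k % m) [] ++ [item]) := by
  obtain ⟨hlen, hL⟩ := hInv
  have hr : k % m < m := Nat.mod_lt _ hm
  intro d
  induction d with
  | zero =>
    intro a ha had
    have haeq : a = k % m := by omega
    subst haeq
    rw [PySem.List.pyRange_one_cons (by exact_mod_cast hr)]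
    rw [pvPlace, if_pos ?_]
    · simp only [PySem.List.pySetD_natCast, PySem.List.pyGetD_natCast]
    · simp only [pvAllEq, List.all_eq_true]
      intro j hj
      rw [PySem.List.mem_pyRange_one] at hj
      have hj0 : 0 ≤ j := le_trans (by positivity) hj.1
      have hjm : j.toNat < m := by omega
      have hjlen : j < (s.length : Int) := by rw [hlen]; exact hj.2
      have hjc : j = ((j.toNat : Nat) : Int) := (Int.toNat_of_nonneg hj0).symm
      rw [hjc]
      simp only [PySem.List.pyGetD_natCast]
      have h1 := hL (k % m) hr
      have h2 := hL j.toNat hjm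
      rw [if_neg (lt_irrefl _)] at h1
      rw [if_neg (by omega : ¬ j.toNat < k % m)] at h2
      rw [h1, h2]
      simp
  | succ d ih =>
    intro a ha had
    have halt : a < k % m := by omega
    rw [PySem.List.pyRange_one_cons (by exact_mod_cast (by omega : a < m))]
    rw [pvPlace, if_neg ?_]
    · have hc : ((a : Int) + 1) = ((a + 1 : Nat) : Int) := by push_cast; ring
      rw [hc]
      exact ih (a + 1) (by omega) (by omega)
    · simp only [pvAllEq, List.all_eq_true, not_forall]
      refine ⟨((m - 1 : Nat) : Int), ?_, ?_⟩
      · rw [PySem.List.mem_pyRange_one]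
        refine ⟨?_, ?_⟩
        · exact_mod_cast (by omega : a ≤ m - 1)
        · exact_mod_cast (by omega : m - 1 < m)
      · simp only [PySem.List.pyGetD_natCast, beq_iff_eq]
        have h1 := hL a (by omega)
        have h2 := hL (m - 1) (by omega)
        rw [if_pos halt] at h1
        rw [if_neg (by omega : ¬ m - 1 < k % m)] at h2
        omega

theorem pv_place (m : Nat) (hm : 0 < m) (k : Nat) (item : Int) (s : List (List Int))
    (hInv : pvInv m k s) :
    ∀ a : Nat, a ≤ k % m →
      pvPlace (m : Int) item s (PySem.List.pyRange (a : Int) (m : Int) 1)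
        = s.set (k % m) (s.getD (k % m) [] ++ [item]) := by
  intro a ha
  exact pv_place_aux m hm k item s hInv (k % m - a) a ha rfl

theorem pv_succ_divmod (m k : Nat) (hm : 0 < m) :
    ((k % m + 1 = m) → (k + 1) / m = k / m + 1 ∧ (k + 1) % m = 0) ∧
    ((k % m + 1 ≠ m) → (k + 1) / m = k / m ∧ (k + 1) % m = k % m + 1) := by
  have h1 : m * (k / m) + k % m = k := Nat.div_add_mod k m
  have h2 : k % m < m := Nat.mod_lt _ hm
  constructor
  · intro h
    have e : k + 1 = m * (k / m + 1) := by rw [Nat.mul_add, Nat.mul_one]; omega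
    rw [e]
    exact ⟨Nat.mul_div_cancel_left _ hm, Nat.mul_mod_right _ _⟩
  · intro h
    have hlt : k % m + 1 < m := by omega
    have e : k + 1 = m * (k / m) + (k % m + 1) := by omega
    rw [e]
    refine ⟨?_, ?_⟩
    · rw [Nat.mul_add_div hm, Nat.div_eq_of_lt hlt]
      omega
    · rw [Nat.mul_add_mod, Nat.mod_eq_of_lt hlt]

theorem pv_inv_step (m : Nat) (hm : 0 < m) (k : Nat) (item : Int) (s : List (List Int))
    (hInv : pvInv m k s) :
    pvInv m (k + 1) (s.set (k % m) (s.getD (k % m) [] ++ [item])) := by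
  obtain ⟨hlen, hL⟩ := hInv
  have hr : k % m < m := Nat.mod_lt _ hm
  refine ⟨by simp [hlen], ?_⟩
  intro i hi
  have hget : (s.set (k % m) (s.getD (k % m) [] ++ [item])).getD i []
      = if k % m = i then s.getD i [] ++ [item] else s.getD i [] := by
    by_cases hik : k % m = i
    · subst hik
      rw [List.getD_eq_getElem _ _ (by rw [List.length_set]; omega : k % m < (s.set (k % m) _).length)]
      simp
    · simp only [if_neg hik, List.getD]
      rw [List.getElem?_set_ne hik]
  have hli := hL i hi
  have hlen1 : (if k % m = i then s.getD i [] ++ [item] else s.getD i []).length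
      = (s.getD i []).length + (if k % m = i then 1 else 0) := by
    split_ifs <;> simp
  rw [hget, hlen1, hli]
  have hd := pv_succ_divmod m k hm
  by_cases hcase : k % m + 1 = m
  · obtain ⟨hdiv, hmod⟩ := hd.1 hcase
    rw [hdiv, hmod]
    split_ifs <;> omega
  · obtain ⟨hdiv, hmod⟩ := hd.2 hcase
    rw [hdiv, hmod]
    split_ifs <;> omega

theorem pv_main (m : Nat) (hm : 0 < m) :
    ∀ (xs : List Int) (k : Nat) (s : List (List Int)), pvInv m k s →
      xs.foldl (fun lists item => pvPlace (m : Int) item lists (PySem.List.pyRange 0 (m : Int) 1)) s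
        = (PySem.List.enumerate xs (k : Int)).foldl
            (fun ls p =>
              PySem.List.pySetD ls (PySem.Int.mod p.1 (m : Int))
                (PySem.List.pyGetD ls (PySem.Int.mod p.1 (m : Int)) [] ++ [p.2])) s := by
  intro xs
  induction xs with
  | nil => intro k s _; simp [PySem.List.enumerate_nil]
  | cons x xs ih =>
    intro k s hInv
    rw [PySem.List.enumerate_cons, List.foldl_cons, List.foldl_cons]
    have hz : ((0 : Int)) = ((0 : Nat) : Int) := by norm_num
    have hstep : pvPlace (m : Int) x s (PySem.List.pyRange 0 (m : Int) 1)
        = s.set (k % m) (s.getD (k % m) [] ++ [x]) := by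
      rw [hz]
      exact pv_place m hm k x s hInv 0 (Nat.zero_le _)
    have hmod : PySem.Int.mod ((k : Nat) : Int) ((m : Nat) : Int) = ((k % m : Nat) : Int) := by
      simp [PySem.Int.mod_natCast]
    have hbstep : PySem.List.pySetD s (PySem.Int.mod ((k : Nat) : Int) (m : Int))
          (PySem.List.pyGetD s (PySem.Int.mod ((k : Nat) : Int) (m : Int)) [] ++ [x])
        = s.set (k % m) (s.getD (k % m) [] ++ [x]) := by
      rw [hmod]
      simp only [PySem.List.pySetD_natCast, PySem.List.pyGetD_natCast]
    rw [hstep, hbstep]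
    have hc : ((k : Int) + 1) = ((k + 1 : Nat) : Int) := by push_cast; ring
    rw [hc]
    exact ih (k + 1) _ (pv_inv_step m hm k x s hInv)

-- ===== VERDICT (by name: the statement is the Claim_ definition above) =====
theorem pv_foldl_id (xs : List Int) (n : Int) (s : List (List Int)) :
    xs.foldl (fun lists item => pvPlace n item lists []) s = s := by
  induction xs generalizing s with
  | nil => rfl
  | cons x xs ih => rw [List.foldl_cons, pvPlace]; exact ih s

theorem split_list_into_n_sublists_old_spec : Claim_equal_split_list_into_n_sublists_old := by
  intro xs n _
  unfold Spec_split_list_into_n_sublists_old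
  unfold split_list_into_n_sublists_old split_list_into_n_sublists_old_alt
  by_cases hn : n ≤ 0
  · rw [if_pos hn, PySem.List.pyRange_one_eq_nil hn]
    simp only [List.foldl_nil]
    exact pv_foldl_id xs n []
  · rw [if_neg hn]
    set m := n.toNat with hmdef
    have hm : 0 < m := by omega
    have hmn : ((m : Nat) : Int) = n := Int.toNat_of_nonneg (by omega)
    rw [← hmn]
    have hlenr : (PySem.List.pyRange 0 (m : Int) 1).length = m := by
      rw [PySem.List.length_pyRange_one]; simp
    have hinitA : (PySem.List.pyRange 0 (m : Int) 1).foldl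
        (fun acc _ => acc ++ [([] : List Int)]) [] = List.replicate m [] := by
      rw [pv_initA, hlenr]; rfl
    have hinitB : (PySem.List.pyRange 0 (m : Int) 1).map (fun _ => ([] : List Int))
        = List.replicate m [] := by
      rw [List.map_const', hlenr]
    rw [hinitA, hinitB]
    have hz : ((0 : Int)) = ((0 : Nat) : Int) := by norm_num
    rw [hz]
    exact pv_main m hm xs 0 (List.replicate m []) (pvInv_zero m)
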